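-- pv_equiv track=rewrite | github.com/abhinavkashyap/sciwing | parsect/utils/science_ie.py | _get_bilou_for_words
-- ===== SOURCE A (Python) =====
-- from typing import List, Dict, Any
--
-- def _get_bilou_for_words(words: List[str], tag: str, mark_as_O: bool) -> List[str]:
--     lines = []
--     if mark_as_O:
--         for word in words:
--             line = f"{word} {' '.join(['O-' + tag] * 3)}"
--             lines.append(line)
--
--     elif len(words) == 1:
--         line = f"{words[0]} {' '.join(['U-' + tag] * 3)}"
--         lines.append(line)
--
--     else:
--         for idx, word in enumerate(words):
--             if idx == 0:
--                 line = f"{word} {' '.join(['B-' + tag] * 3)}"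
--             elif idx == (len(words) - 1):
--                 line = f"{word} {' '.join(['L-' + tag] * 3)}"
--             else:
--                 line = f"{word} {' '.join(['I-' + tag] * 3)}"
--             lines.append(line)
--
--     return lines
-- ===== SOURCE B (Python) =====
-- from typing import List
--
--
-- def _get_bilou_for_words(words: List[str], tag: str, mark_as_O: bool) -> List[str]:
--     if mark_as_O:
--         prefixes = ["O"] * len(words)
--     elif len(words) == 1:
--         prefixes = ["U"]
--     else:
--         prefixes = ["B"] + ["I"] * (len(words) - 2) + ["L"]
--     return [f"{w} {' '.join([p + '-' + tag] * 3)}" for w, p in zip(words, prefixes)]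
-- ===== Notes on version B (the rewrite author's own statement) =====
-- stated objective: simpler
-- what changed: B first computes the whole BILOU prefix table (replicate/concat of 'O'/'U'/'B','I','L') in one step and then formats every word by a single uniform zip-comprehension, instead of A's per-branch formatting loops with index tests inside the loop body.
import Mathlib
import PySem

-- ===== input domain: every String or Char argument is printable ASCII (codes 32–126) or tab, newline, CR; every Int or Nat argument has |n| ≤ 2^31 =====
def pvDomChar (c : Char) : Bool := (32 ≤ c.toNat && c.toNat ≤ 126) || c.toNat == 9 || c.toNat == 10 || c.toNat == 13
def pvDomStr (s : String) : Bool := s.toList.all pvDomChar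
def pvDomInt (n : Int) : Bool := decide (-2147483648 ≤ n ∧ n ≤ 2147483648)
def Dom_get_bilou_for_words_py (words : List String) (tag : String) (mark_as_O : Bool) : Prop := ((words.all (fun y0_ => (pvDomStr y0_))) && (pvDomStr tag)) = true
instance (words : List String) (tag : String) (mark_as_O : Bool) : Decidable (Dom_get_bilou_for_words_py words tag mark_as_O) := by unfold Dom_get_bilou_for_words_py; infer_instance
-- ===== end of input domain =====

-- B replaces A's three formatting loops (with index tests inside the loop body) by
-- computing the BILOU prefix table first and then one uniform zip pass; same cost, simpler.

-- ===== PORT A =====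
def get_bilou_for_words_py (words : List String) (tag : String) (mark_as_O : Bool) : List String :=
  let lines : List String := []
  if mark_as_O then
    words.foldl (fun lines word =>
      lines ++ [word ++ " " ++ PySem.Str.join " " (PySem.List.pyRepeat ["O-" ++ tag] 3)]) lines
  else if words.length = 1 then
    lines ++ [PySem.List.pyGetD words 0 "" ++ " " ++ PySem.Str.join " " (PySem.List.pyRepeat ["U-" ++ tag] 3)]
  else
    (PySem.List.enumerate words).foldl (fun lines p =>
      lines ++ [if p.1 = 0 then p.2 ++ " " ++ PySem.Str.join " " (PySem.List.pyRepeat ["B-" ++ tag] 3)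
                else if p.1 = (words.length : Int) - 1 then p.2 ++ " " ++ PySem.Str.join " " (PySem.List.pyRepeat ["L-" ++ tag] 3)
                else p.2 ++ " " ++ PySem.Str.join " " (PySem.List.pyRepeat ["I-" ++ tag] 3)]) lines

-- ===== PORT B =====
def get_bilou_for_words_py_alt (words : List String) (tag : String) (mark_as_O : Bool) : List String :=
  let prefixes : List String :=
    if mark_as_O then List.replicate words.length "O"
    else if words.length = 1 then ["U"]
    else ["B"] ++ List.replicate (words.length - 2) "I" ++ ["L"]
  (words.zip prefixes).map (fun wp =>
    wp.1 ++ " " ++ PySem.Str.join " " (PySem.List.pyRepeat [wp.2 ++ "-" ++ tag] 3))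

-- ===== PRECONDITION & SPEC =====
def Spec_get_bilou_for_words_py (words : List String) (tag : String) (mark_as_O : Bool) (out : List String) : Prop := out = get_bilou_for_words_py_alt words tag mark_as_O
instance (words : List String) (tag : String) (mark_as_O : Bool) (out : List String) : Decidable (Spec_get_bilou_for_words_py words tag mark_as_O out) := by unfold Spec_get_bilou_for_words_py; infer_instance

-- ===== CLAIM (what is proved, stated in full; the proofs are below) =====
def Claim_equal_get_bilou_for_words_py : Prop := ∀ (words : List String) (tag : String) (mark_as_O : Bool), Dom_get_bilou_for_words_py words tag mark_as_O → Spec_get_bilou_for_words_py words tag mark_as_O (get_bilou_for_words_py words tag mark_as_O)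

-- ===== LEMMAS AND PROOFS =====

theorem pv_zip_replicate {α β : Type} (l : List α) (a : β) :
    l.zip (List.replicate l.length a) = l.map (fun x => (x, a)) := by
  induction l with
  | nil => rfl
  | cons x t ih => simp [List.replicate_succ, ih]

theorem pv_pref_getElem (n i : Nat) (h2 : ¬ n = 1) (hi : i < n)
    (hlen : i < (["B"] ++ List.replicate (n - 2) "I" ++ ["L"] : List String).length) :
    (["B"] ++ List.replicate (n - 2) "I" ++ ["L"] : List String)[i] =
      if i = 0 then "B" else if i = n - 1 then "L" else "I" := by
  have hn : 2 ≤ n := by omega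
  by_cases hiN : i = n - 1
  · rw [List.getElem_append_right (by simp; omega)]
    simp [hiN, show ¬ n - 1 = 0 by omega]
  · rw [List.getElem_append_left (by simp; omega)]
    by_cases hi0 : i = 0
    · subst hi0; simp
    · rw [List.getElem_append_right (by simp; omega)]
      simp [hi0, hiN]

theorem get_bilou_equal (words : List String) (tag : String) (mark_as_O : Bool) :
    get_bilou_for_words_py words tag mark_as_O = get_bilou_for_words_py_alt words tag mark_as_O := by
  unfold get_bilou_for_words_py get_bilou_for_words_py_alt
  by_cases hO : mark_as_O
  · simp only [hO, if_true]
    rw [PySem.List.foldl_append_singleton_eq_map, pv_zip_replicate]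
    simp
  · simp only [hO, if_false, Bool.false_eq_true]
    by_cases h1 : words.length = 1
    · match words, h1 with
      | [w], _ => simp [PySem.List.pyGetD, PySem.List.pyGet?, PySem.List.pyIdx?]
    · simp only [h1, if_false]
      rw [PySem.List.foldl_append_singleton_eq_map]
      rcases words with _ | ⟨w, t⟩
      · rfl
      · have ht : 1 ≤ t.length := by
          rcases t with _ | _
          · simp at h1
          · simp
        have hlen : (["B"] ++ List.replicate ((w :: t).length - 2) "I" ++ ["L"] : List String).length = (w :: t).length := by
          simp; omega
        apply List.ext_getElem
        · simp [PySem.List.length_enumerate]; omega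
        · intro i hA hB
          have hi : i < (w :: t).length := by
            simpa [PySem.List.length_enumerate] using hA
          simp only [List.nil_append, List.getElem_map, PySem.List.getElem_enumerate,
            List.getElem_zip, zero_add]
          rw [pv_pref_getElem (w :: t).length i h1 hi (by rw [hlen]; exact hi)]
          by_cases hz : i = 0
          · simp [hz]
          · have hne : t ≠ [] := by
              rintro rfl; simp at hi; omega
            by_cases hl : i = t.length
            · simp [hl, hne]
            · simp [hz, hl]

-- ===== VERDICT (by name: the statement is the Claim_ definition above) =====
theorem get_bilou_for_words_py_spec : Claim_equal_get_bilou_for_words_py := by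
  intro words tag mark_as_O _
  exact get_bilou_equal words tag mark_as_O
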